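-- pv_equiv track=rewrite | github.com/tlesatsawat/good-sale-pos-backend | src/barcode_scanner.py | _validate_ean13
-- ===== SOURCE A (Python) =====
-- def _validate_ean13(barcode: str) -> bool:
--     """ตรวจสอบ check digit ของ EAN-13"""
--     try:
--         if len(barcode) != 13 or not barcode.isdigit():
--             return False
--
--         # คำนวณ check digit
--         odd_sum = sum(int(barcode[i]) for i in range(0, 12, 2))
--         even_sum = sum(int(barcode[i]) for i in range(1, 12, 2))
--         total = odd_sum + (even_sum * 3)
--         check_digit = (10 - (total % 10)) % 10
--
--         return check_digit == int(barcode[12])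
--
--     except Exception:
--         return False
-- ===== SOURCE B (Python) =====
-- def _checksum(ds, s):
--     """Tail-recursive pairwise state machine: consume two digits at a time,
--     keeping only the running checksum modulo 10."""
--     if len(ds) < 2:
--         return (s + int(ds[0])) % 10 if ds else s
--     return _checksum(ds[2:], (s + int(ds[0]) + 3 * int(ds[1])) % 10)
--
--
-- def _validate_ean13(barcode: str) -> bool:
--     """ตรวจสอบ check digit ของ EAN-13"""
--     try:
--         if len(barcode) != 13 or not barcode.isdigit():
--             return False
--         return _checksum(list(barcode), 0) == 0
--     except Exception:
--         return False
-- ===== Notes on version B (the rewrite author's own statement) =====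
-- stated objective: alternative
-- what changed: Replaces the two index-based half-range sums and explicit check-digit reconstruction with a tail-recursive state machine that consumes the character list two digits at a time, keeping only the running checksum modulo 10 and accepting when the final state is 0; no indices, parity tests or check-digit arithmetic remain.
import Mathlib
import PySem

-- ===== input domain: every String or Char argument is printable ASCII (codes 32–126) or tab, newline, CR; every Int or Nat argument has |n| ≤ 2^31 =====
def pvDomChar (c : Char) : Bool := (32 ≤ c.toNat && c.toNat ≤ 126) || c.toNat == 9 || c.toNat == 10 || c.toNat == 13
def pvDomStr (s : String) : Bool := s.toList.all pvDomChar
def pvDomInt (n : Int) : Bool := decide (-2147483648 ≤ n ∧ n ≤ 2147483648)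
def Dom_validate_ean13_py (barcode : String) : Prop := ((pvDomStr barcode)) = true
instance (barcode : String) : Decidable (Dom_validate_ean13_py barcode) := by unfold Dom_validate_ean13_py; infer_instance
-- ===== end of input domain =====

-- B replaces A's two half-range sums and check-digit reconstruction by a tail-recursive
-- pairwise state machine over the character list, holding only the checksum mod 10
-- (objective: alternative decomposition, same cost).

-- int(c) for a single digit character; both ports only apply it under the isdigit guard,
-- where it is exact
def pvDigit (c : Char) : Int := (c.toNat : Int) - 48

-- ===== PORT A =====
def validate_ean13_py (barcode : String) : Bool :=
  if PySem.Str.len barcode ≠ 13 ∨ PySem.Str.strIsdigit barcode = false then false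
  else
    -- indices produced by range(0,12,2) / range(1,12,2) are in range (len = 13),
    -- so the pyGetD default is never read
    let l := barcode.toList
    let odd_sum := ((PySem.List.pyRange 0 12 2).map (fun i => pvDigit (PySem.List.pyGetD l i '0'))).sum
    let even_sum := ((PySem.List.pyRange 1 12 2).map (fun i => pvDigit (PySem.List.pyGetD l i '0'))).sum
    let total := odd_sum + even_sum * 3
    let check_digit := PySem.Int.mod (10 - PySem.Int.mod total 10) 10
    check_digit == pvDigit (PySem.List.pyGetD l 12 '0')

-- ===== PORT B =====
-- _checksum from Source B: tail recursion on the list, two characters per step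
def pvChecksum : List Char → Int → Int
  | [], s => s
  | [c], s => PySem.Int.mod (s + pvDigit c) 10
  | a :: b :: rest, s => pvChecksum rest (PySem.Int.mod (s + pvDigit a + 3 * pvDigit b) 10)

def validate_ean13_py_alt (barcode : String) : Bool :=
  if PySem.Str.len barcode ≠ 13 ∨ PySem.Str.strIsdigit barcode = false then false
  else pvChecksum barcode.toList 0 == 0

-- ===== PRECONDITION & SPEC =====
def Spec_validate_ean13_py (barcode : String) (out : Bool) : Prop := out = validate_ean13_py_alt barcode
instance (barcode : String) (out : Bool) : Decidable (Spec_validate_ean13_py barcode out) := by unfold Spec_validate_ean13_py; infer_instance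

-- ===== CLAIM (what is proved, stated in full; the proofs are below) =====
def Claim_equal_validate_ean13_py : Prop := ∀ (barcode : String), Dom_validate_ean13_py barcode → Spec_validate_ean13_py barcode (validate_ean13_py barcode)

-- ===== LEMMAS AND PROOFS =====

theorem pvDigit_bounds (c : Char) (h : PySem.Chars.isdigit c = true) :
    0 ≤ pvDigit c ∧ pvDigit c ≤ 9 := by
  simp only [PySem.Chars.isdigit, Bool.and_eq_true, decide_eq_true_eq, Char.le_def,
    UInt32.le_iff_toNat_le] at h
  have h48 : ('0' : Char).val.toNat = 48 := by decide
  have h57 : ('9' : Char).val.toNat = 57 := by decide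
  have hc : c.toNat = c.val.toNat := rfl
  simp only [pvDigit]
  omega

-- ===== VERDICT (by name: the statement is the Claim_ definition above) =====
theorem validate_ean13_py_spec : Claim_equal_validate_ean13_py := by
  intro barcode _
  unfold Spec_validate_ean13_py validate_ean13_py validate_ean13_py_alt
  by_cases hg : PySem.Str.len barcode ≠ 13 ∨ PySem.Str.strIsdigit barcode = false
  · rw [if_pos hg, if_pos hg]
  · rw [if_neg hg, if_neg hg]
    push Not at hg
    obtain ⟨hlen, hdig⟩ := hg
    have hlen' : barcode.toList.length = 13 := by
      have h := hlen
      simp only [PySem.Str.len_eq] at h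
      omega
    have hdig' : barcode.toList.all PySem.Chars.isdigit = true := by
      have h : PySem.Chars.strIsdigit barcode.toList = true := by
        have := Bool.ne_false_iff.mp (by simpa [PySem.Str.strIsdigit] using hdig)
        exact this
      simp only [PySem.Chars.strIsdigit, Bool.and_eq_true] at h
      exact h.2
    obtain ⟨c0,c1,c2,c3,c4,c5,c6,c7,c8,c9,c10,c11,c12,hl⟩ :
        ∃ c0 c1 c2 c3 c4 c5 c6 c7 c8 c9 c10 c11 c12,
          barcode.toList = [c0,c1,c2,c3,c4,c5,c6,c7,c8,c9,c10,c11,c12] := by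
      match hm : barcode.toList, hlen' with
      | [c0,c1,c2,c3,c4,c5,c6,c7,c8,c9,c10,c11,c12], _ =>
        exact ⟨c0,c1,c2,c3,c4,c5,c6,c7,c8,c9,c10,c11,c12, rfl⟩
    rw [hl] at hdig' ⊢
    simp only [List.all_cons, List.all_nil, Bool.and_eq_true, Bool.and_true] at hdig'
    obtain ⟨h0,h1,h2,h3,h4,h5,h6,h7,h8,h9,h10,h11,h12⟩ := hdig'
    have b0 := pvDigit_bounds c0 h0; have b1 := pvDigit_bounds c1 h1
    have b2 := pvDigit_bounds c2 h2; have b3 := pvDigit_bounds c3 h3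
    have b4 := pvDigit_bounds c4 h4; have b5 := pvDigit_bounds c5 h5
    have b6 := pvDigit_bounds c6 h6; have b7 := pvDigit_bounds c7 h7
    have b8 := pvDigit_bounds c8 h8; have b9 := pvDigit_bounds c9 h9
    have b10 := pvDigit_bounds c10 h10; have b11 := pvDigit_bounds c11 h11
    have b12 := pvDigit_bounds c12 h12
    have m10 : ∀ a : Int, PySem.Int.mod a 10 = a % 10 :=
      fun a => PySem.Int.mod_eq_emod_of_pos (by norm_num)
    simp only [pvChecksum, m10]
    simp [PySem.List.pyRange, PySem.List.pyGetD, PySem.List.pyGet?, PySem.List.pyIdx?,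
      List.range_succ]
    omega
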